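-- pv_equiv track=rewrite | github.com/SamiGandhi/VidSim | VidSim/util.py | compress_vectors_to_string
-- ===== SOURCE A (Python) =====
-- def compress_vectors_to_string(block_numbers, compressions):
--     compressed_string = ""
--     current_range = [block_numbers[0]]
--     #here corrected must take in consederation the sequences
--     for i in range(1, len(block_numbers)):
--         if compressions[i] != compressions[i - 1] or block_numbers[i]-1 != block_numbers[i - 1]:
--             if len(current_range) == 1:
--                 compressed_string += str(current_range[0]) + "->" + str(current_range[0]) + compressions[i - 1] + " "
--             else:
--                 compressed_string += str(current_range[0]) + "->" + str(current_range[-1]) + compressions[i - 1] + " "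
--             current_range = [block_numbers[i]]
--         else:
--             current_range.append(block_numbers[i])
--
--     # Handle the last range
--     if len(current_range) == 1:
--         compressed_string += str(current_range[0]) + "->" + str(current_range[0]) + compressions[-1]
--     else:
--         compressed_string += str(current_range[0]) + "->" + str(current_range[-1]) + compressions[-1]
--
--     return compressed_string
-- ===== SOURCE B (Python) =====
-- def compress_vectors_to_string(block_numbers, compressions):
--     # Pass 1: list the cut indices where a new run begins.
--     cuts = [i for i in range(1, len(block_numbers))
--             if compressions[i] != compressions[i - 1]
--             or block_numbers[i] - 1 != block_numbers[i - 1]]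
--     # Pass 2: pair each run's start index with the next cut, format, join.
--     starts = [0] + cuts
--     parts = [f"{block_numbers[s]}->{block_numbers[e - 1]}{compressions[e - 1]}"
--              for s, e in zip(starts, cuts)]
--     parts.append(f"{block_numbers[starts[-1]]}->{block_numbers[-1]}{compressions[-1]}")
--     return " ".join(parts)
-- ===== Notes on version B (the rewrite author's own statement) =====
-- stated objective: alternative
-- what changed: B keeps no running string or run accumulator: it first lists the cut indices with a comprehension, then derives every run as a pair of a start index and the following cut via zip([0]+cuts, cuts), formats each pair independently, and joins with a single space.
import Mathlib
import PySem

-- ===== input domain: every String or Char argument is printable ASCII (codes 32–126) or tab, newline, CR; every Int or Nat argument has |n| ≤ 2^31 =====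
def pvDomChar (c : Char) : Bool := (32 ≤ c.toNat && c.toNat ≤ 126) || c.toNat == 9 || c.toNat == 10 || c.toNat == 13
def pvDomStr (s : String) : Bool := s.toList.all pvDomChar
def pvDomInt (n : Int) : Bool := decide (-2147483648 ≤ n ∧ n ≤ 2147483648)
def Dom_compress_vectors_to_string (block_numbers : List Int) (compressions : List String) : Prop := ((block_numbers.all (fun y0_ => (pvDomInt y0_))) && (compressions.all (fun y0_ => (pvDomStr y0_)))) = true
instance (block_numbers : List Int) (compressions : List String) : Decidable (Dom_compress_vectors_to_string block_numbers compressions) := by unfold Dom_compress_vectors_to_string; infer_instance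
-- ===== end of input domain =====

-- B replaces A's single accumulating loop by staged passes: list the cut indices, pair each
-- start index with the following cut via zip, format each pair, join with " " (alternative).

-- ===== PORT A =====
-- one iteration of A's for-loop; state = (compressed_string as List Char, current_range)
def aStep (block_numbers : List Int) (compressions : List String)
    (st : List Char × List Int) (i : Int) : List Char × List Int :=
  let s := st.1
  let cur := st.2
  if PySem.List.pyGetD compressions i "" ≠ PySem.List.pyGetD compressions (i - 1) "" ∨
      PySem.List.pyGetD block_numbers i 0 - 1 ≠ PySem.List.pyGetD block_numbers (i - 1) 0 then
    let part : List Char :=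
      if cur.length = 1 then
        PySem.Int.toChars (PySem.List.pyGetD cur 0 0) ++ "->".toList ++
          PySem.Int.toChars (PySem.List.pyGetD cur 0 0) ++
          (PySem.List.pyGetD compressions (i - 1) "").toList ++ " ".toList
      else
        PySem.Int.toChars (PySem.List.pyGetD cur 0 0) ++ "->".toList ++
          PySem.Int.toChars (PySem.List.pyGetD cur (-1) 0) ++
          (PySem.List.pyGetD compressions (i - 1) "").toList ++ " ".toList
    (s ++ part, [PySem.List.pyGetD block_numbers i 0])
  else
    (s, cur ++ [PySem.List.pyGetD block_numbers i 0])

def compress_vectors_to_string (block_numbers : List Int) (compressions : List String) : String :=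
  let st := (PySem.List.pyRange 1 (block_numbers.length : Int) 1).foldl
      (aStep block_numbers compressions) ([], [PySem.List.pyGetD block_numbers 0 0])
  let s := st.1
  let cur := st.2
  let final : List Char :=
    if cur.length = 1 then
      PySem.Int.toChars (PySem.List.pyGetD cur 0 0) ++ "->".toList ++
        PySem.Int.toChars (PySem.List.pyGetD cur 0 0) ++
        (PySem.List.pyGetD compressions (-1) "").toList
    else
      PySem.Int.toChars (PySem.List.pyGetD cur 0 0) ++ "->".toList ++
        PySem.Int.toChars (PySem.List.pyGetD cur (-1) 0) ++
        (PySem.List.pyGetD compressions (-1) "").toList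
  String.ofList (s ++ final)

-- ===== PORT B =====
-- the comprehension's filter condition (a new run begins at index i)
def cutB (block_numbers : List Int) (compressions : List String) (i : Int) : Bool :=
  decide (PySem.List.pyGetD compressions i "" ≠ PySem.List.pyGetD compressions (i - 1) "" ∨
    PySem.List.pyGetD block_numbers i 0 - 1 ≠ PySem.List.pyGetD block_numbers (i - 1) 0)

-- f"{s}->{e}{c}"
def fmtPart (s e : Int) (c : String) : List Char :=
  PySem.Int.toChars s ++ "->".toList ++ PySem.Int.toChars e ++ c.toList

def compress_vectors_to_string_alt (block_numbers : List Int) (compressions : List String) : String :=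
  let cuts := (PySem.List.pyRange 1 (block_numbers.length : Int) 1).filter
      (cutB block_numbers compressions)
  let starts := 0 :: cuts
  let parts := (starts.zip cuts).map (fun p =>
    fmtPart (PySem.List.pyGetD block_numbers p.1 0)
      (PySem.List.pyGetD block_numbers (p.2 - 1) 0)
      (PySem.List.pyGetD compressions (p.2 - 1) ""))
  let parts := parts ++ [fmtPart
      (PySem.List.pyGetD block_numbers (PySem.List.pyGetD starts (-1) 0) 0)
      (PySem.List.pyGetD block_numbers (-1) 0)
      (PySem.List.pyGetD compressions (-1) "")]
  String.ofList (PySem.Chars.join " ".toList parts)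

-- ===== PRECONDITION & SPEC =====
-- Exactly the inputs on which the Python A returns: an empty block_numbers raises IndexError at
-- block_numbers[0], and compressions shorter than block_numbers raises IndexError at compressions[i].
def Pre_compress_vectors_to_string (block_numbers : List Int) (compressions : List String) : Prop :=
  block_numbers ≠ [] ∧ block_numbers.length ≤ compressions.length

instance (block_numbers : List Int) (compressions : List String) : Decidable (Pre_compress_vectors_to_string block_numbers compressions) := by unfold Pre_compress_vectors_to_string; infer_instance

def pvWitness_compress_vectors_to_string : List Int × List String := ([1, 2, 5], ["x", "x", "x"])

def Spec_compress_vectors_to_string (block_numbers : List Int) (compressions : List String) (out : String) : Prop := out = compress_vectors_to_string_alt block_numbers compressions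
instance (block_numbers : List Int) (compressions : List String) (out : String) : Decidable (Spec_compress_vectors_to_string block_numbers compressions out) := by unfold Spec_compress_vectors_to_string; infer_instance

-- ===== CLAIM (what is proved, stated in full; the proofs are below) =====
def Claim_equal_compress_vectors_to_string : Prop := ∀ (block_numbers : List Int) (compressions : List String), Dom_compress_vectors_to_string block_numbers compressions → Pre_compress_vectors_to_string block_numbers compressions → Spec_compress_vectors_to_string block_numbers compressions (compress_vectors_to_string block_numbers compressions)

-- ===== LEMMAS AND PROOFS =====

-- current_range has length 1 ⇒ its [-1] element is its [0] element
theorem pyGetD_neg_one_of_len_one (cur : List Int) (h : cur.length = 1) :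
    PySem.List.pyGetD cur (-1) 0 = PySem.List.pyGetD cur 0 0 := by
  obtain ⟨x, rfl⟩ := List.length_eq_one_iff.mp h
  rfl

theorem join_cons_of_ne_nil (sep a : List Char) (rs : List (List Char)) (h : rs ≠ []) :
    PySem.Chars.join sep (a :: rs) = a ++ sep ++ PySem.Chars.join sep rs := by
  cases rs with
  | nil => exact absurd rfl h
  | cons b rs' => rw [PySem.Chars.join_cons_cons]

-- " ".join(ps ++ [p]) = each of ps followed by a space, then p
theorem join_snoc (sep p : List Char) (ps : List (List Char)) :
    PySem.Chars.join sep (ps ++ [p]) = (ps.map (· ++ sep)).flatten ++ p := by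
  induction ps with
  | nil => simp [PySem.Chars.join_singleton]
  | cons a ps' ih =>
      rw [List.cons_append, join_cons_of_ne_nil sep a (ps' ++ [p]) (by simp), ih]
      simp

-- l[-1] stays the same after a cons in front (l nonempty)
theorem pyGetD_neg_one_cons_cons (a b : Int) (l : List Int) (d : Int) :
    PySem.List.pyGetD (a :: b :: l) (-1) d = PySem.List.pyGetD (b :: l) (-1) d := by
  rw [PySem.List.pyGetD_neg_one (xs := a :: b :: l) (h := List.cons_ne_nil _ _),
    PySem.List.pyGetD_neg_one (xs := b :: l) (h := List.cons_ne_nil _ _)]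
  exact List.getLast_cons (List.cons_ne_nil _ _)

-- appending a cut x extends zip([0]+cuts, cuts) by the pair (starts[-1], x)
theorem zip_shift_snoc (h x : Int) (c : List Int) :
    (h :: (c ++ [x])).zip (c ++ [x])
      = (h :: c).zip c ++ [(PySem.List.pyGetD (h :: c) (-1) 0, x)] := by
  induction c generalizing h with
  | nil => rfl
  | cons y c' ih =>
      simp only [List.cons_append, List.zip_cons_cons, ih y,
        pyGetD_neg_one_cons_cons h y c' 0]

-- for nonempty l, l[len(l)-1] = l[-1]
theorem pyGetD_len_sub_one (l : List Int) (h : l ≠ []) (d : Int) :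
    PySem.List.pyGetD l ((l.length : Int) - 1) d = PySem.List.pyGetD l (-1) d := by
  have hl : 0 < l.length := List.length_pos_of_ne_nil h
  have hcast : (l.length : Int) - 1 = ((l.length - 1 : Nat) : Int) := by omega
  rw [PySem.List.pyGetD_neg_one (xs := l) (h := h), hcast, PySem.List.pyGetD_natCast,
    List.getLast_eq_getElem]
  exact List.getD_eq_getElem l d (by omega)

-- one closed segment, formatted with its trailing space
def segPart (block_numbers : List Int) (compressions : List String) (p : Int × Int) : List Char :=
  fmtPart (PySem.List.pyGetD block_numbers p.1 0)
    (PySem.List.pyGetD block_numbers (p.2 - 1) 0)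
    (PySem.List.pyGetD compressions (p.2 - 1) "") ++ " ".toList

-- loop invariant tying A's (string, current_range) after k iterations to B's cut list for prefix k
theorem loop_inv (block_numbers : List Int) (compressions : List String) (k : Nat)
    (hk : 1 ≤ k) (hkn : k ≤ block_numbers.length) :
    (let c := (PySem.List.pyRange 1 (k : Int) 1).filter (cutB block_numbers compressions)
     let A := (PySem.List.pyRange 1 (k : Int) 1).foldl
        (aStep block_numbers compressions) ([], [PySem.List.pyGetD block_numbers 0 0])
     A.1 = (((0 :: c).zip c).map (segPart block_numbers compressions)).flatten ∧
     A.2 ≠ [] ∧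
     PySem.List.pyGetD A.2 0 0
        = PySem.List.pyGetD block_numbers (PySem.List.pyGetD (0 :: c) (-1) 0) 0 ∧
     PySem.List.pyGetD A.2 (-1) 0 = PySem.List.pyGetD block_numbers ((k : Int) - 1) 0) := by
  induction k, hk using Nat.le_induction with
  | base =>
      simp only [Nat.cast_one, PySem.List.pyRange_one_eq_nil (le_refl (1:Int)),
        List.filter_nil, List.foldl_nil]
      exact ⟨rfl, by simp, rfl, by rw [show (1:Int) - 1 = 0 by norm_num]; rfl⟩
  | succ k hk ih =>
      have hsplit : PySem.List.pyRange 1 ((k + 1 : Nat) : Int) 1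
          = PySem.List.pyRange 1 (k : Int) 1 ++ [(k : Int)] := by
        have h : ((k + 1 : Nat) : Int) = (k : Int) + 1 := by push_cast; ring
        rw [h, PySem.List.pyRange_one_succ_right (by exact_mod_cast hk)]
      simp only [hsplit, List.foldl_append, List.foldl_cons, List.foldl_nil,
        List.filter_append]
      set c := (PySem.List.pyRange 1 (k : Int) 1).filter (cutB block_numbers compressions) with hc0
      set A := (PySem.List.pyRange 1 (k : Int) 1).foldl
        (aStep block_numbers compressions) ([], [PySem.List.pyGetD block_numbers 0 0]) with hA
      obtain ⟨h1, h2, h3, h4⟩ := ih (by omega)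
      have hcast : ((k + 1 : Nat) : Int) - 1 = (k : Int) := by push_cast; ring
      by_cases hcut : PySem.List.pyGetD compressions (k : Int) ""
            ≠ PySem.List.pyGetD compressions ((k : Int) - 1) "" ∨
          PySem.List.pyGetD block_numbers (k : Int) 0 - 1
            ≠ PySem.List.pyGetD block_numbers ((k : Int) - 1) 0
      · have hcb : cutB block_numbers compressions (k : Int) = true := by
          simp only [cutB, decide_eq_true_iff]; exact hcut
        have hfil : List.filter (cutB block_numbers compressions) [(k : Int)] = [(k : Int)] := by
          simp [List.filter, hcb]
        rw [hfil, aStep]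
        simp only [if_pos hcut]
        refine ⟨?_, by simp, ?_, ?_⟩
        · -- strings agree: new closed segment appended
          have hz := zip_shift_snoc 0 (k : Int) c
          simp only [← List.cons_append] at hz ⊢
          rw [hz, List.map_append, List.flatten_append, h1]
          congr 1
          simp only [List.map_singleton, List.flatten_cons, List.flatten_nil,
            List.append_nil, segPart, fmtPart, ← h3, ← h4]
          by_cases hlen : A.2.length = 1
          · rw [if_pos hlen, pyGetD_neg_one_of_len_one A.2 hlen]
          · rw [if_neg hlen]
        · -- new start = block_numbers[k]
          rw [← List.cons_append, PySem.List.pyGetD_neg_one_append_singleton]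
          rfl
        · rw [hcast]; rfl
      · have hcb : cutB block_numbers compressions (k : Int) = false := by
          simp only [cutB, decide_eq_false_iff_not]; exact hcut
        have hfil : List.filter (cutB block_numbers compressions) [(k : Int)] = [] := by
          simp [List.filter, hcb]
        rw [hfil, List.append_nil, aStep]
        simp only [if_neg hcut]
        refine ⟨h1, by simp, ?_, ?_⟩
        · obtain ⟨a, t, hat⟩ : ∃ a t, A.2 = a :: t := by
            cases hA2 : A.2 with
            | nil => exact absurd hA2 h2
            | cons a t => exact ⟨a, t, rfl⟩
          rw [hat] at h3 ⊢
          rw [List.cons_append, PySem.List.pyGetD_zero_cons] at *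
          exact h3
        · rw [PySem.List.pyGetD_neg_one_append_singleton, hcast]

theorem compress_eq (block_numbers : List Int) (compressions : List String)
    (hne : block_numbers ≠ []) :
    compress_vectors_to_string block_numbers compressions
      = compress_vectors_to_string_alt block_numbers compressions := by
  have hlen : 1 ≤ block_numbers.length := List.length_pos_of_ne_nil hne
  have H := loop_inv block_numbers compressions block_numbers.length hlen le_rfl
  rw [compress_vectors_to_string, compress_vectors_to_string_alt]
  set c := (PySem.List.pyRange 1 (block_numbers.length : Int) 1).filter
    (cutB block_numbers compressions) with hc0
  set A := (PySem.List.pyRange 1 (block_numbers.length : Int) 1).foldl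
    (aStep block_numbers compressions) ([], [PySem.List.pyGetD block_numbers 0 0]) with hA
  obtain ⟨h1, h2, h3, h4⟩ := H
  have h4' : PySem.List.pyGetD A.2 (-1) 0 = PySem.List.pyGetD block_numbers (-1) 0 := by
    rw [h4, pyGetD_len_sub_one block_numbers hne]
  have hstr : A.1 = ((((0 :: c).zip c).map (fun p =>
      fmtPart (PySem.List.pyGetD block_numbers p.1 0)
        (PySem.List.pyGetD block_numbers (p.2 - 1) 0)
        (PySem.List.pyGetD compressions (p.2 - 1) ""))).map (· ++ " ".toList)).flatten := by
    rw [h1, List.map_map]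
    exact congrArg List.flatten (List.map_congr_left (fun p _ => rfl))
  have hfin : (if A.2.length = 1 then
      PySem.Int.toChars (PySem.List.pyGetD A.2 0 0) ++ "->".toList ++
        PySem.Int.toChars (PySem.List.pyGetD A.2 0 0) ++
        (PySem.List.pyGetD compressions (-1) "").toList
    else
      PySem.Int.toChars (PySem.List.pyGetD A.2 0 0) ++ "->".toList ++
        PySem.Int.toChars (PySem.List.pyGetD A.2 (-1) 0) ++
        (PySem.List.pyGetD compressions (-1) "").toList)
      = fmtPart (PySem.List.pyGetD block_numbers (PySem.List.pyGetD (0 :: c) (-1) 0) 0)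
          (PySem.List.pyGetD block_numbers (-1) 0)
          (PySem.List.pyGetD compressions (-1) "") := by
    simp only [fmtPart, ← h3, ← h4']
    by_cases hlen1 : A.2.length = 1
    · rw [if_pos hlen1, pyGetD_neg_one_of_len_one A.2 hlen1]
    · rw [if_neg hlen1]
  rw [join_snoc, hstr, hfin]

-- ===== VERDICT (by name: the statement is the Claim_ definition above) =====
theorem compress_vectors_to_string_spec : Claim_equal_compress_vectors_to_string := by
  intro block_numbers compressions _ hpre
  exact compress_eq block_numbers compressions hpre.1
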